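-- pv_equiv track=rewrite | github.com/PatrickRose/advent-of-code | python/2019/DaySixteen.py | calculate_fft
-- ===== SOURCE A (Python) =====
-- def calculate_fft(value, offset = 0, num_times = 100):
--     length = len(value)
--
--     for j in range(num_times):
--         fft = value[:offset]
--
--         last_value = None
--
--         for i in range(offset, length):
--             if i > length // 2:
--                 if last_value is None:
--                     last_value = sum(value[i:])
--                 else:
--                     last_value -= value[i-1]
--                 fft.append(last_value % 10)
--                 continue
--
--             up_to = i
--             type = [1,0,-1,0]
--             position = 0
--             char = 0
--
--             adds = []
--             minuses = []
--
--             while up_to < length: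
--                 limit = up_to + i + 1
--                 if position % 2 == 0:
--                     to_handle = value[up_to:limit]
--                     to_add = [x for x in to_handle]
--                     if position == 0:
--                         adds += to_add
--                     else:
--                         minuses += to_add
--                 up_to = limit
--                 position = (position + 1) % 4
--
--             char = sum(adds) - sum(minuses)
--
--             fft.append(abs(char) % 10)
--
--         value = fft
--     return value
-- ===== SOURCE B (Python) =====
-- def calculate_fft(value, offset=0, num_times=100):
--     n = len(value)
--     for _ in range(num_times):
--         # prefix sums: prefix[k] == sum(value[:k]); any pattern block is a single difference
--         prefix = [0]
--         acc = 0
--         for x in value: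
--             acc += x
--             prefix.append(acc)
--         out = value[:offset]
--         for i in range(offset, n):
--             if i > n // 2:
--                 out.append((prefix[n] - prefix[i]) % 10)
--             else:
--                 total = 0
--                 sign = 1
--                 s = i
--                 step = i + 1
--                 while s < n:
--                     total += sign * (prefix[min(s + step, n)] - prefix[s])
--                     sign = -sign
--                     s += 2 * step
--                 out.append(abs(total) % 10)
--         value = out
--     return value
-- ===== Notes on version B (the rewrite author's own statement) =====
-- stated objective: alternative
-- what changed: Each phase builds a prefix-sum array once and computes every pattern block as a single prefix difference (stepping only over the signed blocks), instead of materialising per-element adds/minuses slice lists; the tail half reads the same prefix array instead of a rolling slice sum.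
import Mathlib
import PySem

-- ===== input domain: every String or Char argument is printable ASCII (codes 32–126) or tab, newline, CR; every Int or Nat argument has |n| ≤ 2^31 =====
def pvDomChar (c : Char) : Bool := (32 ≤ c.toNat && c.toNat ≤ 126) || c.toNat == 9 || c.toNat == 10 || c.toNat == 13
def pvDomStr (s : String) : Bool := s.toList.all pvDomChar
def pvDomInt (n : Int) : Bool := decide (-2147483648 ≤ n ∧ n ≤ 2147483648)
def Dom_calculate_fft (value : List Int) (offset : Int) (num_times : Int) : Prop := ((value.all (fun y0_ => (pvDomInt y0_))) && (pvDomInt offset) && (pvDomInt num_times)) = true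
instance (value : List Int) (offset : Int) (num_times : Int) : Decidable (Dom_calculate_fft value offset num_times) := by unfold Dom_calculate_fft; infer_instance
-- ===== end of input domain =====

-- B replaces A's per-element adds/minuses slice lists by a once-per-phase prefix-sum array:
-- each pattern block becomes a single prefix difference (a different per-phase algorithm).


-- ===== PORT A =====
-- A's inner 'while up_to < length' loop, collecting the adds / minuses lists.
-- Fuel-bounded recursion: fuel 2*(len+1) is enough whenever 0 ≤ i (the only case Pre_ admits;
-- for a negative i the Python while loop never terminates).
def fftBlocks (value : List Int) (length i : Int) :
    Nat → Int → Int → List Int × List Int → List Int × List Int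
  | 0, _, _, st => st
  | fuel + 1, up_to, position, (adds, minuses) =>
    if up_to < length then
      let limit := up_to + i + 1
      let st' :=
        if PySem.Int.mod position 2 = 0 then
          let to_handle := PySem.List.slice value (some up_to) (some limit)
          let to_add := to_handle.map (fun x => x)
          if position = 0 then (adds ++ to_add, minuses) else (adds, minuses ++ to_add)
        else (adds, minuses)
      fftBlocks value length i fuel limit (PySem.Int.mod (position + 1) 4) st'
    else (adds, minuses)

-- the body of A's 'for i in range(offset, length)' loop; state = (fft, last_value)
def fftStep (value : List Int) (length : Int) (st : List Int × Option Int) (i : Int) :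
    List Int × Option Int :=
  let fft := st.1
  let last_value := st.2
  if i > PySem.Int.floordiv length 2 then
    let lv : Int :=
      match last_value with
      | none => (PySem.List.slice value (some i) none).sum      -- sum(value[i:])
      | some l => l - PySem.List.pyGetD value (i - 1) 0         -- value[i-1]; in range whenever this branch runs under Pre_
    (fft ++ [PySem.Int.mod lv 10], some lv)
  else
    let r := fftBlocks value length i (2 * (value.length + 1)) i 0 ([], [])
    let char := r.1.sum - r.2.sum
    (fft ++ [PySem.Int.mod |char| 10], last_value)

-- 'for i in range(offset, length)'; the range start is clamped to 0 as a divergence guard only: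
-- for offset < 0 the Python never finishes a single iteration (excluded by Pre_)
def fftPhaseA (value : List Int) (offset : Int) : List Int :=
  let length := (value.length : Int)
  ((PySem.List.pyRange (max offset 0) length 1).foldl (fftStep value length)
    (PySem.List.slice value none (some offset), none)).1

-- 'for j in range(num_times)' as a counting recursion (range objects are not materialised)
def fftPhasesA (offset : Int) : Nat → List Int → List Int
  | 0, v => v
  | k + 1, v => fftPhasesA offset k (fftPhaseA v offset)

def calculate_fft (value : List Int) (offset : Int) (num_times : Int) : List Int :=
  fftPhasesA offset num_times.toNat value

-- ===== PORT B =====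
-- Source B's running-sum loop 'prefix = [0]; acc = 0; for x in value: acc += x; prefix.append(acc)' as a scan
def fftPrefix (acc : Int) : List Int → List Int
  | [] => [acc]
  | x :: xs => acc :: fftPrefix (acc + x) xs

-- Source B's 'while s < n' loop over the signed blocks; fuel len+1 is enough whenever 0 < step
def fftAltBlocks (pfx : List Int) (n step : Int) : Nat → Int → Int → Int → Int
  | 0, _, _, total => total
  | fuel + 1, s, sign, total =>
    if s < n then
      let total' := total + sign *
        (PySem.List.pyGetD pfx (min (s + step) n) 0 - PySem.List.pyGetD pfx s 0)
      fftAltBlocks pfx n step fuel (s + 2 * step) (-sign) total'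
    else total

def fftAltStep (pfx : List Int) (n fuelLen : Int) (out : List Int) (i : Int) : List Int :=
  if i > PySem.Int.floordiv n 2 then
    out ++ [PySem.Int.mod (PySem.List.pyGetD pfx n 0 - PySem.List.pyGetD pfx i 0) 10]
  else
    let total := fftAltBlocks pfx n (i + 1) (fuelLen + 1).toNat i 1 0
    out ++ [PySem.Int.mod |total| 10]

-- same clamp guard as in fftPhaseA: for offset < 0 the Python Source B loop never terminates
def fftPhaseB (value : List Int) (offset : Int) : List Int :=
  let n := (value.length : Int)
  let pfx := fftPrefix 0 value
  (PySem.List.pyRange (max offset 0) n 1).foldl (fftAltStep pfx n n)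
    (PySem.List.slice value none (some offset))

def fftPhasesB (offset : Int) : Nat → List Int → List Int
  | 0, v => v
  | k + 1, v => fftPhasesB offset k (fftPhaseB v offset)

def calculate_fft_alt (value : List Int) (offset : Int) (num_times : Int) : List Int :=
  fftPhasesB offset num_times.toNat value

-- ===== PRECONDITION & SPEC =====
-- Pre_ admits exactly the inputs on which the Python A terminates: with at least one phase and a
-- negative offset, A's inner while loop (step i+1 ≤ 0 for i = offset < 0) never terminates.
def Pre_calculate_fft (value : List Int) (offset : Int) (num_times : Int) : Prop :=
  0 ≤ offset ∨ num_times ≤ 0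
instance (value : List Int) (offset : Int) (num_times : Int) : Decidable (Pre_calculate_fft value offset num_times) := by unfold Pre_calculate_fft; infer_instance
def pvWitness_calculate_fft : List Int × Int × Int := ([1, 2, 3, 4, 5, 6, 7, 8], 1, 2)

def Spec_calculate_fft (value : List Int) (offset : Int) (num_times : Int) (out : List Int) : Prop := out = calculate_fft_alt value offset num_times
instance (value : List Int) (offset : Int) (num_times : Int) (out : List Int) : Decidable (Spec_calculate_fft value offset num_times out) := by unfold Spec_calculate_fft; infer_instance

-- ===== CLAIM (what is proved, stated in full; the proofs are below) =====
def Claim_equal_calculate_fft : Prop := ∀ (value : List Int) (offset : Int) (num_times : Int), Dom_calculate_fft value offset num_times → Pre_calculate_fft value offset num_times → Spec_calculate_fft value offset num_times (calculate_fft value offset num_times)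

-- ===== LEMMAS AND PROOFS =====

-- fftAltBlocks is an accumulator loop: the total parameter shifts out
lemma fftAltBlocks_shift (pfx : List Int) (n step : Int) :
    ∀ (F : Nat) (s sign t : Int),
      fftAltBlocks pfx n step F s sign t = t + fftAltBlocks pfx n step F s sign 0 := by
  intro F
  induction F with
  | zero => intro s sign t; simp [fftAltBlocks]
  | succ F ih =>
    intro s sign t
    simp only [fftAltBlocks]
    split
    · rw [ih, ih (t := 0 + _)]; ring
    · simp

-- prefix array: entry k is the sum of the first k elements
lemma fftPrefix_getD : ∀ (xs : List Int) (acc : Int) (k : Nat), k ≤ xs.length →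
    (fftPrefix acc xs).getD k 0 = acc + (xs.take k).sum := by
  intro xs
  induction xs with
  | nil =>
    intro acc k hk
    have : k = 0 := by simpa using hk
    subst this; simp [fftPrefix]
  | cons x xs ih =>
    intro acc k hk
    cases k with
    | zero => simp [fftPrefix]
    | succ k =>
      simp only [fftPrefix, List.getD_cons_succ, List.take_succ_cons, List.sum_cons]
      rw [ih (acc + x) k (by simpa using hk)]; ring

lemma fftPrefix_pyGetD (xs : List Int) (j : Int) (h0 : 0 ≤ j) (hj : j ≤ xs.length) :
    PySem.List.pyGetD (fftPrefix 0 xs) j 0 = (xs.take j.toNat).sum := by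
  rw [show j = ((j.toNat : Nat) : Int) by omega, PySem.List.pyGetD_natCast,
    fftPrefix_getD xs 0 j.toNat (by omega), Int.toNat_natCast]
  ring

-- take-sums clamp at the length
lemma take_sum_min (xs : List Int) (k : Nat) :
    (xs.take (min k xs.length)).sum = (xs.take k).sum := by
  rcases (show k ≤ xs.length ∨ xs.length < k by omega) with h | h
  · rw [min_eq_left h]
  · rw [min_eq_right (le_of_lt h), List.take_of_length_le (le_refl _),
      List.take_of_length_le (le_of_lt h)]

lemma drop_take_sum (xs : List Int) (a b : Nat) :
    ((xs.drop a).take b).sum = (xs.take (a + b)).sum - (xs.take a).sum := by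
  rw [List.take_add, List.sum_append]; ring

lemma drop_sum (xs : List Int) (a : Nat) :
    (xs.drop a).sum = xs.sum - (xs.take a).sum := by
  conv_lhs => rw [show xs.drop a = xs.drop a from rfl]
  have h := List.take_append_drop a xs
  calc (xs.drop a).sum = ((xs.take a).sum + (xs.drop a).sum) - (xs.take a).sum := by ring
    _ = xs.sum - (xs.take a).sum := by rw [← List.sum_append, h]

-- peel one element off a suffix sum
lemma drop_succ_sum (xs : List Int) (a : Nat) (h : a < xs.length) :
    (xs.drop a).sum = xs[a] + (xs.drop (a + 1)).sum := by
  rw [List.drop_eq_getElem_cons h, List.sum_cons]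

-- once s has reached n, Source B's while loop is done whatever the fuel
lemma fftAltBlocks_ge (pfx : List Int) (n step : Int) (F : Nat) (s sign t : Int)
    (h : n ≤ s) : fftAltBlocks pfx n step F s sign t = t := by
  cases F with
  | zero => simp [fftAltBlocks]
  | succ F => simp [fftAltBlocks, not_lt.mpr h]

-- the heart: A's adds/minuses block walk computes exactly B's signed prefix-difference walk
lemma blocks_eq (value : List Int) (i : Int) (hi : 0 ≤ i) :
    ∀ (F : Nat) (s pos sign : Int) (a m : List Int),
      0 ≤ s →
      (pos = 0 ∧ sign = 1 ∨ pos = 2 ∧ sign = -1) →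
      (value.length : Int) ≤ s + (i + 1) * (2 * F) →
      (fftBlocks value (value.length : Int) i (2 * F) s pos (a, m)).1.sum -
        (fftBlocks value (value.length : Int) i (2 * F) s pos (a, m)).2.sum =
      a.sum - m.sum +
        fftAltBlocks (fftPrefix 0 value) (value.length : Int) (i + 1) F s sign 0 := by
  intro F
  induction F with
  | zero =>
    intro s pos sign a m hs hps hfuel
    simp only [fftBlocks, fftAltBlocks]
    ring
  | succ F ih =>
    intro s pos sign a m hs hps hfuel
    set n : Int := (value.length : Int) with hn
    rcases (show s < n ∨ n ≤ s by omega) with hsn | hsn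
    · have hblock : (PySem.List.slice value (some s) (some (s + i + 1))).sum =
          PySem.List.pyGetD (fftPrefix 0 value) (min (s + (i + 1)) n) 0 -
          PySem.List.pyGetD (fftPrefix 0 value) s 0 := by
        rw [PySem.List.slice_toNat value (by omega) (by omega),
          drop_take_sum, fftPrefix_pyGetD value s (by omega) (by omega),
          fftPrefix_pyGetD value _ (by omega) (by omega)]
        have h1 : (min (s + (i + 1)) n).toNat = min (s + i + 1).toNat value.length := by omega
        have h2 : s.toNat + ((s + i + 1).toNat - s.toNat) = (s + i + 1).toNat := by omega
        rw [h1, h2, take_sum_min]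
      have hfuel' : n ≤ (s + i + 1 + i + 1) + (i + 1) * (2 * (F : Int)) := by
        have hr : (i + 1) * (2 * ((F : Int) + 1)) = (i + 1) * (2 * (F : Int)) + 2 * (i + 1) := by
          ring
        push_cast at hfuel
        rw [hr] at hfuel
        omega
      rw [show 2 * (F + 1) = 2 * F + 1 + 1 by ring]
      rcases hps with ⟨hp, hsg⟩ | ⟨hp, hsg⟩ <;> subst hp hsg
      · -- position 0: an added block, then a skipped block
        simp only [fftBlocks, if_pos hsn,
          show PySem.Int.mod (0:Int) 2 = 0 from by decide,
          show PySem.Int.mod ((0:Int)+1) 4 = 1 from by decide, List.map_id_fun', id]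
        rcases (show s + i + 1 < n ∨ n ≤ s + i + 1 by omega) with h2n | h2n
        · rw [if_pos h2n]
          simp only [show PySem.Int.mod (1:Int) 2 = 1 from by decide,
            if_neg (show ¬((1:Int) = 0) from by decide), if_true,
            show PySem.Int.mod ((1:Int)+1) 4 = 2 from by decide]
          rw [ih (s + i + 1 + i + 1) 2 (-1) _ _ (by omega) (Or.inr ⟨rfl, rfl⟩) hfuel']
          conv_rhs => rw [fftAltBlocks]
          rw [if_pos hsn, show s + 2 * (i + 1) = s + i + 1 + i + 1 from by ring]
          conv_rhs => rw [fftAltBlocks_shift]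
          rw [← hblock]
          try simp only [List.sum_append]
          ring
        · rw [if_neg (not_lt.mpr h2n)]
          conv_rhs => rw [fftAltBlocks]
          rw [if_pos hsn, fftAltBlocks_ge _ _ _ _ _ _ _ (by omega), ← hblock]
          try simp only [if_true, List.sum_append]
          ring
      · -- position 2: a subtracted block, then a skipped block
        simp only [fftBlocks, if_pos hsn,
          show PySem.Int.mod (2:Int) 2 = 0 from by decide,
          if_neg (show ¬((2:Int) = 0) from by decide), if_true,
          show PySem.Int.mod ((2:Int)+1) 4 = 3 from by decide, List.map_id_fun', id]
        rcases (show s + i + 1 < n ∨ n ≤ s + i + 1 by omega) with h2n | h2n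
        · rw [if_pos h2n]
          simp only [show PySem.Int.mod (3:Int) 2 = 1 from by decide,
            if_neg (show ¬((3:Int) = 0) from by decide),
            if_neg (show ¬((1:Int) = 0) from by decide),
            show PySem.Int.mod ((3:Int)+1) 4 = 0 from by decide]
          rw [ih (s + i + 1 + i + 1) 0 1 _ _ (by omega) (Or.inl ⟨rfl, rfl⟩) hfuel']
          conv_rhs => rw [fftAltBlocks]
          rw [if_pos hsn, show s + 2 * (i + 1) = s + i + 1 + i + 1 from by ring]
          conv_rhs => rw [fftAltBlocks_shift]
          rw [← hblock]
          try simp only [List.sum_append]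
          ring
        · rw [if_neg (not_lt.mpr h2n)]
          conv_rhs => rw [fftAltBlocks]
          rw [if_pos hsn, fftAltBlocks_ge _ _ _ _ _ _ _ (by omega), ← hblock]
          try simp only [List.sum_append]
          ring
    · rw [show 2 * (F + 1) = (2 * F + 1) + 1 by ring]
      simp only [fftBlocks, if_neg (not_lt.mpr hsn), fftAltBlocks]
      ring
-- invariant carried by A's last_value across the i-loop
def lvInv (value : List Int) (i : Int) (lv : Option Int) : Prop :=
  lv = none ∨
    (PySem.Int.floordiv (value.length : Int) 2 < i - 1 ∧ 1 ≤ i ∧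
      lv = some ((value.drop (i - 1).toNat).sum))

-- the i-loop of one phase: A's fold (with its last_value state) equals B's fold
lemma phase_loop (value : List Int) :
    ∀ (cnt : Nat) (i : Int) (fft : List Int) (lv : Option Int),
      0 ≤ i → cnt = ((value.length : Int) - i).toNat →
      lvInv value i lv →
      ((PySem.List.pyRange i (value.length : Int) 1).foldl
          (fftStep value (value.length : Int)) (fft, lv)).1 =
      (PySem.List.pyRange i (value.length : Int) 1).foldl
          (fftAltStep (fftPrefix 0 value) (value.length : Int) (value.length : Int)) fft := by
  intro cnt
  induction cnt with
  | zero =>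
    intro i fft lv hi hcnt hinv
    rw [PySem.List.pyRange_one_eq_nil (by omega)]
    rfl
  | succ cnt ih =>
    intro i fft lv hi hcnt hinv
    have hin : i < (value.length : Int) := by omega
    rw [PySem.List.pyRange_one_cons hin]
    simp only [List.foldl_cons]
    have hd : 2 * PySem.Int.floordiv (value.length : Int) 2 ≤ (value.length : Int) ∧
        (value.length : Int) < 2 * PySem.Int.floordiv (value.length : Int) 2 + 2 := by
      rw [PySem.Int.floordiv_eq_ediv_of_pos (by omega)]
      omega
    rcases (show PySem.Int.floordiv (value.length : Int) 2 < i ∨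
        i ≤ PySem.Int.floordiv (value.length : Int) 2 by omega) with hbig | hsmall
    · -- suffix branch on both sides
      have hA : fftStep value (value.length : Int) (fft, lv) i =
          (fft ++ [PySem.Int.mod ((value.drop i.toNat).sum) 10],
            some ((value.drop i.toNat).sum)) := by
        rcases hinv with hnone | ⟨h1, h2, h3⟩
        · subst hnone
          simp only [fftStep, if_pos hbig]
          rw [PySem.List.slice_from value hi]
        · subst h3
          simp only [fftStep, if_pos hbig]
          have hidx : (i - 1).toNat < value.length := by omega
          have hlv : (value.drop (i - 1).toNat).sum - PySem.List.pyGetD value (i - 1) 0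
              = (value.drop i.toNat).sum := by
            rw [PySem.List.pyGetD_eq_getElem value (i := i - 1) 0 (by omega) (by omega),
              drop_succ_sum value (i - 1).toNat hidx,
              show (i - 1).toNat + 1 = i.toNat from by omega]
            ring
          rw [hlv]
      have hB : fftAltStep (fftPrefix 0 value) (value.length : Int) (value.length : Int) fft i =
          fft ++ [PySem.Int.mod ((value.drop i.toNat).sum) 10] := by
        simp only [fftAltStep, if_pos hbig]
        rw [fftPrefix_pyGetD value (value.length : Int) (by omega) (by omega),
          fftPrefix_pyGetD value i (by omega) (by omega), drop_sum,
          show ((value.length : Int)).toNat = value.length from by omega,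
          List.take_of_length_le (le_refl _)]
      rw [hA, hB]
      refine ih (i + 1) _ _ (by omega) (by omega) ?_
      exact Or.inr ⟨by omega, by omega, by rw [show (i + 1 - 1 : Int) = i from by ring]⟩
    · -- block branch on both sides
      have hnotbig : ¬ (i > PySem.Int.floordiv (value.length : Int) 2) := by omega
      have hlvnone : lv = none := by
        rcases hinv with h | ⟨h1, _, _⟩
        · exact h
        · omega
      subst hlvnone
      have hchar := blocks_eq value i hi (value.length + 1) i 0 1 [] []
        hi (Or.inl ⟨rfl, rfl⟩) (by push_cast; nlinarith)
      have hA : fftStep value (value.length : Int) (fft, none) i =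
          (fft ++ [PySem.Int.mod
            |fftAltBlocks (fftPrefix 0 value) (value.length : Int) (i + 1)
              (value.length + 1) i 1 0| 10], none) := by
        simp only [fftStep, if_neg hnotbig]
        rw [hchar]
        norm_num
      have hB : fftAltStep (fftPrefix 0 value) (value.length : Int) (value.length : Int) fft i =
          fft ++ [PySem.Int.mod
            |fftAltBlocks (fftPrefix 0 value) (value.length : Int) (i + 1)
              (value.length + 1) i 1 0| 10] := by
        simp only [fftAltStep, if_neg hnotbig,
          show (((value.length : Int)) + 1).toNat = value.length + 1 from by omega]
      rw [hA, hB]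
      exact ih (i + 1) _ none (by omega) (by omega) (Or.inl rfl)

-- one whole phase
lemma phase_eq (value : List Int) (offset : Int) (hoff : 0 ≤ offset) :
    fftPhaseA value offset = fftPhaseB value offset := by
  unfold fftPhaseA fftPhaseB
  rw [max_eq_left hoff]
  exact phase_loop value ((value.length : Int) - offset).toNat offset _ none hoff rfl
    (Or.inl rfl)

-- all the phases
lemma phases_eq (offset : Int) (hoff : 0 ≤ offset) :
    ∀ (k : Nat) (v : List Int), fftPhasesA offset k v = fftPhasesB offset k v := by
  intro k
  induction k with
  | zero => intro v; rfl
  | succ k ih =>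
    intro v
    simp only [fftPhasesA, fftPhasesB, phase_eq v offset hoff, ih]

-- ===== VERDICT (by name: the statement is the Claim_ definition above) =====
theorem calculate_fft_spec : Claim_equal_calculate_fft := by
  intro value offset num_times _ hpre
  unfold Spec_calculate_fft calculate_fft calculate_fft_alt
  rcases (show 0 ≤ offset ∨ offset < 0 by omega) with hoff | hoff
  · exact phases_eq offset hoff num_times.toNat value
  · have hnt : num_times ≤ 0 := by
      rcases hpre with h | h
      · omega
      · exact h
    rw [show num_times.toNat = 0 from by omega]
    rfl
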